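-- pv_equiv track=rewrite | github.com/jakehoward/advent-of-code | 2024/python/days/day_22.py | get_sequence_to_max_bananas
-- ===== SOURCE A (Python) =====
-- def get_sequence_to_max_bananas(bananas_to_sequence):
--     seq_to_max_bananas = {}
--     for n_bananas, sequences in bananas_to_sequence.items():
--         for s in sequences:
--             if s in seq_to_max_bananas:
--                 if seq_to_max_bananas[s] > n_bananas:
--                     continue
--             seq_to_max_bananas[s] = n_bananas
--     return seq_to_max_bananas
-- ===== SOURCE B (Python) =====
-- def get_sequence_to_max_bananas(bananas_to_sequence):
--     # flatten to (sequence, bananas) pairs in iteration order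
--     pairs = [(s, n) for n, seqs in bananas_to_sequence.items() for s in seqs]
--     # scan pairs from highest bananas down; the first write per sequence is its max
--     best = {}
--     for s, n in sorted(pairs, key=lambda p: p[1], reverse=True):
--         best.setdefault(s, n)
--     # rebuild with keys in first-occurrence order, matching A's insertion order
--     return {s: best[s] for s, _ in pairs}
-- ===== Notes on version B (the rewrite author's own statement) =====
-- stated objective: alternative
-- what changed: B flattens the input into (sequence, bananas) pairs, sorts them by banana count descending and takes the first write per sequence via setdefault, then rebuilds the result dict in first-occurrence order, replacing A's interleaved keep-larger update with a sort-then-first-match algorithm.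
import Mathlib
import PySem

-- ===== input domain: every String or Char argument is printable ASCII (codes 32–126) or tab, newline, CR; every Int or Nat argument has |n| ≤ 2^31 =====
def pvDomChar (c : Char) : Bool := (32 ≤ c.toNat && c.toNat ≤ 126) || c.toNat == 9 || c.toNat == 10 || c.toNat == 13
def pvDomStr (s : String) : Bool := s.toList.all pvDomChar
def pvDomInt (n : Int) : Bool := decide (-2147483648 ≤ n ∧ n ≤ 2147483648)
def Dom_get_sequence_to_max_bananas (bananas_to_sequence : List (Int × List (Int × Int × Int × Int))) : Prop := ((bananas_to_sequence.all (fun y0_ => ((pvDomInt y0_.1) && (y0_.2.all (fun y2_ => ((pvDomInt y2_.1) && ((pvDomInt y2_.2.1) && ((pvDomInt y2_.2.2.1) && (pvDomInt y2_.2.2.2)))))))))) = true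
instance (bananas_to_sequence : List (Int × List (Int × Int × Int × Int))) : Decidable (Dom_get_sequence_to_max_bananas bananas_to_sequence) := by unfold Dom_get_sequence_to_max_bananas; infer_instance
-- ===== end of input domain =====

-- B flattens the dict to (sequence, bananas) pairs, scans them sorted by bananas descending with a
-- first-write-wins setdefault, and rebuilds the dict in first-occurrence order (a sort-based
-- alternative to A's interleaved keep-larger update); the returned dict is proved equal, order included.

-- ===== PORT A =====
-- one loop-body step of A: 'if s in d: if d[s] > n: continue; d[s] = n'
def pvStepA (n : Int) (d : PySem.Dict (Int × Int × Int × Int) Int) (s : Int × Int × Int × Int) :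
    PySem.Dict (Int × Int × Int × Int) Int :=
  match d.get? s with
  | some v => if v > n then d else d.insert s n
  | none => d.insert s n

def get_sequence_to_max_bananas (bananas_to_sequence : List (Int × List (Int × Int × Int × Int))) : List (Int × Int × Int × Int × Int) :=
  (bananas_to_sequence.foldl
    (fun d p => p.2.foldl (pvStepA p.1) d)
    PySem.Dict.empty).items.map (fun p => (p.1.1, p.1.2.1, p.1.2.2.1, p.1.2.2.2, p.2))  -- type-convention glue: a dict pair ((a,b,c,d), v) is the 5-tuple (a,b,c,d,v)

-- ===== PORT B =====
-- the flattening comprehension: pairs = [(s, n) for n, seqs in d.items() for s in seqs]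
def pvPairs (bananas_to_sequence : List (Int × List (Int × Int × Int × Int))) :
    List ((Int × Int × Int × Int) × Int) :=
  bananas_to_sequence.flatMap (fun p => p.2.map (fun s => (s, p.1)))

def get_sequence_to_max_bananas_alt (bananas_to_sequence : List (Int × List (Int × Int × Int × Int))) : List (Int × Int × Int × Int × Int) :=
  let pairs := pvPairs bananas_to_sequence
  let best := (PySem.List.sorted pairs (fun q => q.2) true).foldl
    (fun d q => d.setdefault q.1 q.2) PySem.Dict.empty
  -- best[s]: 'getD … 0' is exact — sorted is a permutation of pairs, so every s scanned below is a key of best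
  (pairs.foldl
    (fun d q => d.insert q.1 (best.getD q.1 0))
    PySem.Dict.empty).items.map (fun p => (p.1.1, p.1.2.1, p.1.2.2.1, p.1.2.2.2, p.2))  -- type-convention glue as in port A

-- ===== PRECONDITION & SPEC =====
def Spec_get_sequence_to_max_bananas (bananas_to_sequence : List (Int × List (Int × Int × Int × Int))) (out : List (Int × Int × Int × Int × Int)) : Prop := out = get_sequence_to_max_bananas_alt bananas_to_sequence
instance (bananas_to_sequence : List (Int × List (Int × Int × Int × Int))) (out : List (Int × Int × Int × Int × Int)) : Decidable (Spec_get_sequence_to_max_bananas bananas_to_sequence out) := by unfold Spec_get_sequence_to_max_bananas; infer_instance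

-- ===== CLAIM (what is proved, stated in full; the proofs are below) =====
def Claim_equal_get_sequence_to_max_bananas : Prop := ∀ (bananas_to_sequence : List (Int × List (Int × Int × Int × Int))), Dom_get_sequence_to_max_bananas bananas_to_sequence → Spec_get_sequence_to_max_bananas bananas_to_sequence (get_sequence_to_max_bananas bananas_to_sequence)

-- ===== LEMMAS AND PROOFS =====

-- the banana counts recorded for key k in a pair list
def pvVals (k : Int × Int × Int × Int) (L : List ((Int × Int × Int × Int) × Int)) : List Int :=
  (L.filter (fun x => x.1 == k)).map (fun x => x.2)

-- running maximum with an optional seed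
def pvMaxRun (o : Option Int) (vs : List Int) : Option Int :=
  vs.foldl (fun o n => some (max (o.getD n) n)) o

-- A's nested loops are one loop over the flattened pairs
lemma pvA_flatten (bts : List (Int × List (Int × Int × Int × Int)))
    (d : PySem.Dict (Int × Int × Int × Int) Int) :
    bts.foldl (fun d p => p.2.foldl (pvStepA p.1) d) d
      = (pvPairs bts).foldl (fun d q => pvStepA q.2 d q.1) d := by
  induction bts generalizing d with
  | nil => rfl
  | cons p rest ih =>
      simp only [pvPairs, List.flatMap_cons, List.foldl_append, List.foldl_cons, List.foldl_map]
      rw [ih]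
      rfl

lemma pvStepA_get? (n : Int) (d : PySem.Dict (Int × Int × Int × Int) Int)
    (s k : Int × Int × Int × Int) :
    (pvStepA n d s).get? k
      = if s = k then some (max ((d.get? k).getD n) n) else d.get? k := by
  cases hg : d.get? s with
  | none =>
      have hstep : pvStepA n d s = d.insert s n := by simp only [pvStepA, hg]
      rw [hstep]
      by_cases hks : s = k
      · subst hks
        rw [if_pos rfl, PySem.Dict.get?_insert_self, hg]
        simp [max_self]
      · rw [if_neg hks, PySem.Dict.get?_insert_of_ne _ _ (fun h => hks h.symm)]
  | some v =>
      have hstep : pvStepA n d s = if v > n then d else d.insert s n := by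
        simp only [pvStepA, hg]
      rw [hstep]
      by_cases hks : s = k
      · subst hks
        rw [if_pos rfl, hg]
        split_ifs with h
        · rw [hg]; congr 1; simp; omega
        · rw [PySem.Dict.get?_insert_self]; congr 1; simp; omega
      · rw [if_neg hks]
        split_ifs
        · rfl
        · exact PySem.Dict.get?_insert_of_ne _ _ (fun h => hks h.symm)

-- the value A holds for k is the running max over the banana counts seen for k
lemma pvA_get? (pairs : List ((Int × Int × Int × Int) × Int))
    (d : PySem.Dict (Int × Int × Int × Int) Int) (k : Int × Int × Int × Int) :
    (pairs.foldl (fun d q => pvStepA q.2 d q.1) d).get? k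
      = pvMaxRun (d.get? k) (pvVals k pairs) := by
  induction pairs generalizing d with
  | nil => rfl
  | cons q rest ih =>
      simp only [List.foldl_cons]
      rw [ih, pvStepA_get? q.2 d q.1 k]
      by_cases h : q.1 = k
      · simp [pvVals, pvMaxRun, h]
      · simp [pvVals, pvMaxRun, h]

lemma pvStepA_keys (n : Int) (d : PySem.Dict (Int × Int × Int × Int) Int)
    (s : Int × Int × Int × Int) :
    (pvStepA n d s).keys = PySem.Set.add d.keys s := by
  have hc : PySem.Set.contains d.keys s = d.contains s := by
    rw [PySem.Dict.contains_eq_decide_mem_keys]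
    by_cases h : s ∈ d.keys
    · simp [h, (PySem.Set.contains_iff d.keys s).mpr h]
    · simp only [h, decide_false]
      by_contra hcc
      exact h ((PySem.Set.contains_iff d.keys s).mp (by revert hcc; cases PySem.Set.contains d.keys s <;> simp))
  unfold PySem.Set.add
  rw [hc]
  cases hg : d.get? s with
  | none =>
      have hcf : d.contains s = false := by
        rw [PySem.Dict.contains_eq_isSome_get?, hg]; rfl
      have hstep : pvStepA n d s = d.insert s n := by simp only [pvStepA, hg]
      rw [hstep, hcf]
      simp only [Bool.false_eq_true, if_false]
      exact PySem.Dict.keys_insert_of_not_contains _ _ hcf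
  | some v =>
      have hct : d.contains s = true := by
        rw [PySem.Dict.contains_eq_isSome_get?, hg]; rfl
      have hstep : pvStepA n d s = if v > n then d else d.insert s n := by
        simp only [pvStepA, hg]
      rw [hstep, hct]
      simp only [if_true]
      split_ifs
      · rfl
      · exact PySem.Dict.keys_insert_of_contains _ _ hct

lemma pvA_keys (pairs : List ((Int × Int × Int × Int) × Int))
    (d : PySem.Dict (Int × Int × Int × Int) Int) :
    (pairs.foldl (fun d q => pvStepA q.2 d q.1) d).keys
      = PySem.Set.update d.keys (pairs.map (fun q => q.1)) := by
  induction pairs generalizing d with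
  | nil => rfl
  | cons q rest ih =>
      simp only [List.foldl_cons, List.map_cons]
      rw [ih, pvStepA_keys]
      rfl

-- lookup after the setdefault loop: the FIRST occurrence in the scanned list wins
lemma pv_get?_setdefault_self (d : PySem.Dict (Int × Int × Int × Int) Int)
    (k : Int × Int × Int × Int) (v : Int) :
    (d.setdefault k v).get? k = if d.contains k then d.get? k else some v := by
  unfold PySem.Dict.setdefault
  split_ifs with h
  · rfl
  · have hnone : d.items.find? (fun p => p.1 == k) = none := by
      rw [List.find?_eq_none]
      intro x hx hpx
      have : d.items.any (fun p => p.1 == k) = true := List.any_of_mem hx hpx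
      exact absurd this (by simpa [PySem.Dict.contains] using h)
    simp [PySem.Dict.get?, List.find?_append, hnone]

lemma pvBest_get? (L : List ((Int × Int × Int × Int) × Int))
    (d : PySem.Dict (Int × Int × Int × Int) Int) (k : Int × Int × Int × Int) :
    (L.foldl (fun d q => d.setdefault q.1 q.2) d).get? k
      = (d.get? k).or ((L.find? (fun q => q.1 == k)).map (fun q => q.2)) := by
  induction L generalizing d with
  | nil => simp
  | cons q rest ih =>
      simp only [List.foldl_cons]
      rw [ih]
      by_cases h : q.1 = k
      · subst h
        rw [pv_get?_setdefault_self]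
        have hfind : List.find? (fun x => x.1 == q.1) (q :: rest) = some q := by
          simp [List.find?_cons]
        rw [hfind]
        split_ifs with hc
        · cases hg : d.get? q.1 with
          | none =>
              rw [PySem.Dict.contains_eq_isSome_get?, hg] at hc
              exact absurd hc (by simp)
          | some v => simp [hg]
        · cases hg : d.get? q.1 with
          | none => simp [hg]
          | some v =>
              rw [PySem.Dict.contains_eq_isSome_get?, hg] at hc
              exact absurd rfl hc
      · have hne : k ≠ q.1 := fun hh => h hh.symm
        rw [PySem.Dict.get?_setdefault_of_ne _ _ hne]
        have : List.find? (fun x => x.1 == k) (q :: rest)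
            = List.find? (fun x => x.1 == k) rest := by
          simp [List.find?_cons, h]
        rw [this]

-- the first match in a list sorted by count descending carries the maximum count for its key
lemma pvFind_max (k : Int × Int × Int × Int) (S : List ((Int × Int × Int × Int) × Int))
    (hp : S.Pairwise (fun a b => b.2 ≤ a.2)) (q : (Int × Int × Int × Int) × Int)
    (hf : S.find? (fun x => x.1 == k) = some q) :
    q.1 = k ∧ q.2 ∈ pvVals k S ∧ ∀ v ∈ pvVals k S, v ≤ q.2 := by
  induction S with
  | nil => simp at hf
  | cons a t ih =>
      rw [List.pairwise_cons] at hp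
      by_cases h : a.1 = k
      · have : (a :: t).find? (fun x => x.1 == k) = some a := by simp [List.find?_cons, h]
        rw [this] at hf
        injection hf with hf
        subst hf
        refine ⟨h, by simp [pvVals, h], ?_⟩
        intro v hv
        simp only [pvVals, List.filter_cons, h] at hv
        simp only [beq_self_eq_true, if_true, List.map_cons, List.mem_cons] at hv
        rcases hv with hv | hv
        · omega
        · simp only [pvVals, List.mem_map, List.mem_filter] at hv
          obtain ⟨x, ⟨hx, _⟩, hvx⟩ := hv
          subst hvx
          exact hp.1 x hx
      · have : (a :: t).find? (fun x => x.1 == k) = t.find? (fun x => x.1 == k) := by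
          simp [List.find?_cons, h]
        rw [this] at hf
        have hv : pvVals k (a :: t) = pvVals k t := by simp [pvVals, List.filter_cons, h]
        rw [hv]
        exact ih hp.2 hf

-- the seed of the running max bounds its result
lemma pvMaxRun_seed_le (t : List Int) (w m : Int) (h : pvMaxRun (some w) t = some m) :
    w ≤ m := by
  induction t generalizing w with
  | nil =>
      simp only [pvMaxRun, List.foldl_nil, Option.some.injEq] at h
      omega
  | cons v t ih =>
      simp only [pvMaxRun, List.foldl_cons, Option.getD_some] at h
      exact le_trans (le_max_left w v) (ih _ h)

-- a result of the running max is a member of the list (or the seed) and bounds it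
lemma pvMaxRun_spec (vs : List Int) (o : Option Int) (m : Int)
    (h : pvMaxRun o vs = some m) :
    (∀ v ∈ vs, v ≤ m) ∧ (m ∈ vs ∨ o = some m) := by
  induction vs generalizing o with
  | nil => exact ⟨by simp, Or.inr h⟩
  | cons v t ih =>
      simp only [pvMaxRun, List.foldl_cons] at h
      obtain ⟨hbound, hmem⟩ := ih _ h
      have hseed : max (o.getD v) v ≤ m := pvMaxRun_seed_le t _ m h
      refine ⟨?_, ?_⟩
      · intro w hw
        rcases List.mem_cons.mp hw with rfl | hw
        · exact le_trans (le_max_right _ _) hseed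
        · exact hbound w hw
      · rcases hmem with hm | hm
        · exact Or.inl (List.mem_cons_of_mem _ hm)
        · injection hm with hm
          cases ho : o with
          | none =>
              subst ho
              simp only [Option.getD_none, max_self] at hm
              exact Or.inl (by rw [List.mem_cons]; left; omega)
          | some w =>
              subst ho
              simp only [Option.getD_some] at hm
              rcases le_total w v with hwv | hwv
              · exact Or.inl (by rw [List.mem_cons]; left; rw [← hm]; omega)
              · exact Or.inr (by rw [← hm]; congr 1; omega)

lemma pvMaxRun_isSome (vs : List Int) (hne : vs ≠ []) (o : Option Int) :
    (pvMaxRun o vs).isSome := by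
  induction vs generalizing o with
  | nil => exact absurd rfl hne
  | cons v t ih =>
      simp only [pvMaxRun, List.foldl_cons]
      by_cases ht : t = []
      · subst ht; rfl
      · exact ih ht _

-- lookup after B's rebuild loop: every occurrence writes the same value best[k]
lemma pvF_get? (pairs : List ((Int × Int × Int × Int) × Int))
    (bv : (Int × Int × Int × Int) → Int)
    (d : PySem.Dict (Int × Int × Int × Int) Int) (k : Int × Int × Int × Int) :
    (pairs.foldl (fun d q => d.insert q.1 (bv q.1)) d).get? k
      = if k ∈ pairs.map (fun q => q.1) then some (bv k) else d.get? k := by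
  induction pairs generalizing d with
  | nil => simp
  | cons q rest ih =>
      simp only [List.foldl_cons, List.map_cons, List.mem_cons]
      rw [ih]
      by_cases h : k ∈ rest.map (fun q => q.1)
      · simp [h]
      · by_cases hk : k = q.1
        · subst hk
          simp [h, PySem.Dict.get?_insert_self]
        · simp only [h, or_false, if_neg hk]
          exact PySem.Dict.get?_insert_of_ne _ _ hk

-- ===== VERDICT (by name: the statement is the Claim_ definition above) =====
theorem get_sequence_to_max_bananas_spec : Claim_equal_get_sequence_to_max_bananas := by
  intro bts _
  unfold Spec_get_sequence_to_max_bananas get_sequence_to_max_bananas get_sequence_to_max_bananas_alt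
  rw [pvA_flatten]
  set pairs := pvPairs bts with hpairs
  set S := PySem.List.sorted pairs (fun q => q.2) true with hS
  set best := S.foldl (fun d q => d.setdefault q.1 q.2) PySem.Dict.empty with hbest
  set DA := pairs.foldl (fun d q => pvStepA q.2 d q.1) PySem.Dict.empty with hDA
  set F := pairs.foldl (fun d q => d.insert q.1 (best.getD q.1 0)) PySem.Dict.empty with hF
  have hperm : S.Perm pairs := PySem.List.sorted_perm pairs _ true
  have hvalsperm : ∀ k, ∀ v, v ∈ pvVals k S ↔ v ∈ pvVals k pairs := by
    intro k v
    exact ((hperm.filter _).map _).mem_iff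
  -- the two dicts have the same (Nodup) key lists
  have hkA : DA.keys = PySem.Set.update ([] : List (Int × Int × Int × Int)) (pairs.map (fun q => q.1)) := by
    rw [hDA, pvA_keys]; rfl
  have hkF : F.keys = PySem.Set.update ([] : List (Int × Int × Int × Int)) (pairs.map (fun q => q.1)) := by
    rw [hF, PySem.Dict.keys_foldl_insert_key pairs (fun q => q.1) (fun _ q => best.getD q.1 0)]
    rfl
  have hndA : DA.keys.Nodup := by rw [hkA]; exact PySem.Set.nodup_update _ _ List.nodup_nil
  have hndF : F.keys.Nodup := by rw [hkF]; exact PySem.Set.nodup_update _ _ List.nodup_nil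
  have hitems : DA.items = F.items := by
    rw [PySem.Dict.items_eq_map_keys DA hndA 0, PySem.Dict.items_eq_map_keys F hndF 0, hkA, hkF]
    apply List.map_congr_left
    intro k hk
    have hkmem : k ∈ pairs.map (fun q => q.1) := by
      have := (PySem.Set.mem_update ([] : List (Int × Int × Int × Int)) (pairs.map (fun q => q.1)) k).mp hk
      simpa using this
    -- A's value at k: some max m
    have hvne : pvVals k pairs ≠ [] := by
      obtain ⟨q, hq, hq1⟩ := List.mem_map.mp hkmem
      intro hnil
      have : q.2 ∈ pvVals k pairs := by
        simp only [pvVals, List.mem_map, List.mem_filter]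
        exact ⟨q, ⟨hq, by simp [hq1]⟩, rfl⟩
      rw [hnil] at this; exact absurd this (List.not_mem_nil)
    have hAg : DA.get? k = pvMaxRun none (pvVals k pairs) := by
      rw [hDA, pvA_get?]; rfl
    have hsomeA : (DA.get? k).isSome := by
      rw [hAg]; exact pvMaxRun_isSome _ hvne none
    obtain ⟨m, hm⟩ := Option.isSome_iff_exists.mp hsomeA
    obtain ⟨hmax, hmem⟩ := pvMaxRun_spec _ _ _ (hAg ▸ hm)
    have hmmem : m ∈ pvVals k pairs := by
      rcases hmem with h | h
      · exact h
      · exact absurd h (by simp)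
    -- B's value at k: the first (largest) entry of the sorted scan
    have hfind : ∃ q, S.find? (fun x => x.1 == k) = some q := by
      obtain ⟨x, hx, hx1⟩ := List.mem_map.mp hkmem
      have hxS : x ∈ S := hperm.mem_iff.mpr hx
      have : (S.find? (fun x => x.1 == k)).isSome := by
        rw [List.find?_isSome]
        exact ⟨x, hxS, by simp [hx1]⟩
      exact Option.isSome_iff_exists.mp this
    obtain ⟨q, hq⟩ := hfind
    obtain ⟨hq1, hqmem, hqmax⟩ :=
      pvFind_max k S (PySem.List.sorted_pairwise_rev pairs (fun q => q.2)) q hq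
    have hBg : best.get? k = some q.2 := by
      rw [hbest, pvBest_get?, hq]
      simp [PySem.Dict.get?_empty]
    -- the two values agree: both are THE maximum of the same multiset
    have hvals : q.2 = m := by
      have h1 : q.2 ≤ m := hmax _ ((hvalsperm k q.2).mp hqmem)
      have h2 : m ≤ q.2 := hqmax _ ((hvalsperm k m).mpr hmmem)
      omega
    have hFg : F.get? k = some (best.getD k 0) := by
      rw [hF]
      have h' := pvF_get? pairs (fun x => best.getD x 0) PySem.Dict.empty k
      rw [if_pos hkmem] at h'
      exact h'
    have hbq : best.getD k 0 = q.2 := PySem.Dict.getD_of_get?_eq_some best 0 hBg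
    rw [PySem.Dict.getD_of_get?_eq_some DA 0 hm,
        PySem.Dict.getD_of_get?_eq_some F 0 hFg, hbq, hvals]
  rw [hitems]
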